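-- pv_equiv track=rewrite | github.com/hengxiao/WorkspaceHarness | cli/src/harness/ingest.py | _pattern_base
-- ===== SOURCE A (Python) =====
-- def _pattern_base(pattern: str) -> str:
--     """Return the fixed prefix of a glob pattern (up to the first wildcard)."""
--     parts = pattern.split("/")
--     base_parts: list[str] = []
--     for p in parts:
--         if any(ch in p for ch in "*?[{"):
--             break
--         base_parts.append(p)
--     return "/".join(base_parts) or "."
-- ===== SOURCE B (Python) =====
-- def _pattern_base(pattern: str) -> str:
--     """Return the fixed prefix of a glob pattern (up to the first wildcard)."""
--     i = next((k for k, ch in enumerate(pattern) if ch in "*?[{"), None)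
--     if i is None:
--         return pattern or "."
--     return pattern[:i].rpartition("/")[0] or "."
-- ===== Notes on version B (the rewrite author's own statement) =====
-- stated objective: simpler
-- what changed: Replaces split-into-segments plus a segment loop with break and a join by a single locate of the first wildcard character, a slice up to it and str.rpartition on the separator to drop the partial segment.
import Mathlib
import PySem

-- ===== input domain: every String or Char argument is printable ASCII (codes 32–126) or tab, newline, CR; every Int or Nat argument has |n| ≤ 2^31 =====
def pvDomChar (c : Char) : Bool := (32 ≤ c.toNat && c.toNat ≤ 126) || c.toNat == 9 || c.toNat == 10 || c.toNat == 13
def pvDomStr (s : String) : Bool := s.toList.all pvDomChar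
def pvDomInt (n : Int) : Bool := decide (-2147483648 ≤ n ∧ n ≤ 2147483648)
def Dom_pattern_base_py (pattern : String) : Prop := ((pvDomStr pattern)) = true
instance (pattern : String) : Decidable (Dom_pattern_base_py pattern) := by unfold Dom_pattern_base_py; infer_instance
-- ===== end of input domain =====

-- B replaces A's split-into-segments + segment loop with break + join by locating the first
-- wildcard character, slicing up to it and dropping the partial final segment with str.rpartition
-- (objective: simpler; same return value).

-- ===== PORT A =====
-- the loop 'for p in parts: if any(ch in p for ch in "*?[{"): break; base_parts.append(p)'
def pattern_base_go (parts : List (List Char)) (baseParts : List (List Char)) : List (List Char) :=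
  match parts with
  | [] => baseParts
  | p :: rest =>
      if "*?[{".toList.any (fun ch => PySem.Chars.isIn [ch] p) then baseParts
      else pattern_base_go rest (baseParts ++ [p])

def pattern_base_py (pattern : String) : String :=
  let parts := PySem.Chars.splitOn pattern.toList "/".toList
  let baseParts := pattern_base_go parts []
  let joined := PySem.Chars.join "/".toList baseParts
  if joined = [] then "." else String.ofList joined

-- ===== PORT B =====
-- hand port of s.rpartition("/")[0] (exact: the prefix before the LAST '/', '' when absent)
def rpartition0 (cs : List Char) : List Char :=
  match cs with
  | [] => []
  | c :: rest => if '/' ∈ rest then c :: rpartition0 rest else []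

def pattern_base_py_alt (pattern : String) : String :=
  let cs := pattern.toList
  match cs.findIdx? (fun ch => "*?[{".toList.contains ch) with
  | none => if pattern = "" then "." else pattern
  | some i =>
      let head := rpartition0 (PySem.Chars.slice cs none (some (i : Int)))
      if head = [] then "." else String.ofList head

-- ===== PRECONDITION & SPEC =====
def Spec_pattern_base_py (pattern : String) (out : String) : Prop := out = pattern_base_py_alt pattern
instance (pattern : String) (out : String) : Decidable (Spec_pattern_base_py pattern out) := by unfold Spec_pattern_base_py; infer_instance

-- ===== CLAIM (what is proved, stated in full; the proofs are below) =====
def Claim_equal_pattern_base_py : Prop := ∀ (pattern : String), Dom_pattern_base_py pattern → Spec_pattern_base_py pattern (pattern_base_py pattern)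

-- ===== LEMMAS AND PROOFS =====

-- the wildcard test, as B writes it
def wildB (c : Char) : Bool := "*?[{".toList.contains c

-- a segment is clean when it contains no wildcard character
def cleanSeg (p : List Char) : Bool := !(p.any wildB)

-- split on '/' as a (first segment, remaining segments) pair
def split1 : List Char → List Char × List (List Char)
  | [] => ([], [])
  | c :: rest =>
      let ht := split1 rest
      if c = '/' then ([], ht.1 :: ht.2) else (c :: ht.1, ht.2)

lemma split1_slash (rest : List Char) :
    split1 ('/' :: rest) = ([], (split1 rest).1 :: (split1 rest).2) := by
  simp [split1]

lemma split1_other (c : Char) (rest : List Char) (hc : c ≠ '/') :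
    split1 (c :: rest) = (c :: (split1 rest).1, (split1 rest).2) := by
  simp [split1, hc]

lemma isIn_singleton (c : Char) (p : List Char) :
    PySem.Chars.isIn [c] p = p.contains c := by
  by_cases h : c ∈ p
  · obtain ⟨s, t, rfl⟩ := List.append_of_mem h
    simp [PySem.Chars.isIn_iff_infix]
    exact ⟨s, t, by simp⟩
  · have h1 : PySem.Chars.isIn [c] p = false := by
      rw [PySem.Chars.isIn_eq_false_iff]
      intro hinf
      exact h (hinf.mem (by simp))
    simp [h1, h]

lemma anyWild_eq (p : List Char) :
    ("*?[{".toList.any (fun ch => PySem.Chars.isIn [ch] p)) = p.any wildB := by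
  have hw : "*?[{".toList = ['*', '?', '[', '{'] := rfl
  rw [hw]
  simp only [List.any_cons, List.any_nil, isIn_singleton, Bool.or_false]
  cases hA : p.any wildB with
  | true =>
      obtain ⟨c, hc, hwc⟩ := List.any_eq_true.mp hA
      have : c = '*' ∨ c = '?' ∨ c = '[' ∨ c = '{' := by
        revert hwc; simp [wildB, hw]
      rcases this with rfl | rfl | rfl | rfl <;>
        simp [List.contains_eq_mem, hc]
  | false =>
      have := List.any_eq_false.mp hA
      have h1 : '*' ∉ p := fun h => by simpa [wildB, hw] using this _ h
      have h2 : '?' ∉ p := fun h => by simpa [wildB, hw] using this _ h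
      have h3 : '[' ∉ p := fun h => by simpa [wildB, hw] using this _ h
      have h4 : '{' ∉ p := fun h => by simpa [wildB, hw] using this _ h
      simp [List.contains_eq_mem, h1, h2, h3, h4]

lemma pattern_base_go_eq (parts acc : List (List Char)) :
    pattern_base_go parts acc = acc ++ parts.takeWhile cleanSeg := by
  induction parts generalizing acc with
  | nil => simp [pattern_base_go]
  | cons p rest ih =>
      rw [pattern_base_go, anyWild_eq]
      cases hc : cleanSeg p with
      | true =>
          have hfalse : p.any wildB = false := by
            simpa [cleanSeg] using hc
          simp [hfalse, ih, hc]
      | false =>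
          have htrue : p.any wildB = true := by
            simpa [cleanSeg] using hc
          simp [htrue, hc]

lemma splitOn_go_eq (fuel : Nat) (l cur : List Char) (acc : List (List Char))
    (h : l.length ≤ fuel) :
    PySem.Chars.splitOn.go ['/'] fuel l cur acc =
      acc.reverse ++ ((cur.reverse ++ (split1 l).1) :: (split1 l).2) := by
  induction fuel generalizing l cur acc with
  | zero =>
      have hl : l = [] := by simpa using List.length_eq_zero_iff.mp (Nat.le_zero.mp h)
      subst hl
      simp [PySem.Chars.splitOn.go, split1]
  | succ fuel ih =>
      cases l with
      | nil => simp [PySem.Chars.splitOn.go, split1]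
      | cons c rest =>
          by_cases hc : c = '/'
          · subst hc
            have hpre : ['/'].isPrefixOf ('/' :: rest) = true := by
              simp [List.isPrefixOf]
            rw [PySem.Chars.splitOn.go]
            simp only [hpre, if_true]
            rw [ih _ _ _ (by simpa using Nat.le_of_succ_le_succ h)]
            simp [split1_slash]
          · have hpre : ['/'].isPrefixOf (c :: rest) = false := by
              simp [List.isPrefixOf]
              exact fun h' => hc h'.symm
            rw [PySem.Chars.splitOn.go]
            simp only [hpre, Bool.false_eq_true, if_false]
            rw [ih _ _ _ (by simpa using Nat.le_of_succ_le_succ h)]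
            simp [split1_other _ _ hc]

lemma splitOn_eq_split1 (cs : List Char) :
    PySem.Chars.splitOn cs ['/'] = (split1 cs).1 :: (split1 cs).2 := by
  rw [PySem.Chars.splitOn, splitOn_go_eq _ _ _ _ (by omega)]
  simp

lemma join_split1 (cs : List Char) :
    PySem.Chars.join ['/'] ((split1 cs).1 :: (split1 cs).2) = cs := by
  induction cs with
  | nil => simp [split1, PySem.Chars.join_singleton]
  | cons c rest ih =>
      by_cases hc : c = '/'
      · subst hc
        rw [split1_slash, PySem.Chars.join_cons_cons]
        simpa using ih
      · rw [split1_other _ _ hc]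
        cases hsp : (split1 rest).2 with
        | nil =>
            rw [hsp] at ih
            rw [PySem.Chars.join_singleton] at ih ⊢
            simp [ih]
        | cons q t =>
            rw [hsp] at ih
            rw [PySem.Chars.join_cons_cons] at ih ⊢
            simpa using ih

lemma segs_clean (cs : List Char) (h : ∀ c ∈ cs, wildB c = false) :
    ∀ p ∈ (split1 cs).1 :: (split1 cs).2, cleanSeg p = true := by
  induction cs with
  | nil => simp [split1, cleanSeg]
  | cons c rest ih =>
      have hrest : ∀ x ∈ rest, wildB x = false := fun x hx => h x (by simp [hx])
      have hc : wildB c = false := h c (by simp)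
      intro p hp
      by_cases hcs : c = '/'
      · subst hcs
        rw [split1_slash] at hp
        simp only [] at hp
        rw [List.mem_cons] at hp
        rcases hp with rfl | hp
        · simp [cleanSeg]
        · exact ih hrest p hp
      · rw [split1_other _ _ hcs] at hp
        simp only [] at hp
        rw [List.mem_cons] at hp
        rcases hp with rfl | hp
        · have := ih hrest (split1 rest).1 (by simp)
          simpa [cleanSeg, hc] using this
        · exact ih hrest p (by simp [hp])

lemma clean_fst_iff (cs : List Char) (i : Nat)
    (h : cs.findIdx? wildB = some i) :
    (cleanSeg (split1 cs).1 = true ↔ '/' ∈ cs.take i) := by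
  induction cs generalizing i with
  | nil => simp at h
  | cons c rest ih =>
      rw [List.findIdx?_cons] at h
      by_cases hw : wildB c = true
      · rw [if_pos hw] at h
        have hi : i = 0 := by simpa using (Option.some_inj.mp h).symm
        subst hi
        constructor
        · intro hcl
          exfalso
          by_cases hcs : c = '/'
          · subst hcs; simp [wildB] at hw
          · rw [split1_other _ _ hcs] at hcl
            simp [cleanSeg, hw] at hcl
        · intro hmem; simp at hmem
      · rw [if_neg hw] at h
        obtain ⟨i', hi', rfl⟩ := Option.map_eq_some_iff.mp h
        by_cases hcs : c = '/'
        · subst hcs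
          rw [split1_slash]
          simp [cleanSeg, List.take_succ_cons]
        · rw [split1_other _ _ hcs]
          have hwc : wildB c = false := by simpa using hw
          have : cleanSeg (c :: (split1 rest).1) = cleanSeg (split1 rest).1 := by
            simp [cleanSeg, hwc]
          rw [this, ih i' hi', List.take_succ_cons]
          constructor
          · intro hm; simp [hm]
          · intro hm
            rcases List.mem_cons.mp hm with rfl | hm
            · exact absurd rfl hcs
            · exact hm

lemma main_eq (cs : List Char) :
    PySem.Chars.join ['/'] (((split1 cs).1 :: (split1 cs).2).takeWhile cleanSeg) =
      (match cs.findIdx? wildB with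
       | none => cs
       | some i => rpartition0 (cs.take i)) := by
  induction cs with
  | nil => simp [split1, cleanSeg, PySem.Chars.join_singleton]
  | cons c rest ih =>
      rw [List.findIdx?_cons]
      by_cases hw : wildB c = true
      · -- first character is a wildcard: both sides empty
        rw [if_pos hw]
        have hcs : c ≠ '/' := by intro h; subst h; simp [wildB] at hw
        rw [split1_other _ _ hcs]
        have hncl : cleanSeg (c :: (split1 rest).1) = false := by
          simp [cleanSeg, hw]
        simp [hncl, PySem.Chars.join_nil, rpartition0]
      · rw [if_neg hw]
        have hwc : wildB c = false := by simpa using hw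
        by_cases hcs : c = '/'
        · subst hcs
          rw [split1_slash]
          have hclnil : cleanSeg ([] : List Char) = true := by simp [cleanSeg]
          rw [List.takeWhile_cons_of_pos hclnil]
          cases hI : rest.findIdx? wildB with
          | none =>
              -- no wildcard at all: A joins everything back to the input
              have hall : ∀ x ∈ rest, wildB x = false := List.findIdx?_eq_none_iff.mp hI
              have htw : ((split1 rest).1 :: (split1 rest).2).takeWhile cleanSeg
                  = (split1 rest).1 :: (split1 rest).2 :=
                List.takeWhile_eq_self_iff.mpr (segs_clean rest hall)
              rw [htw, PySem.Chars.join_cons_cons]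
              simp only [Option.map_none]
              simpa using join_split1 rest
          | some i' =>
              rw [hI] at ih
              have ih' : PySem.Chars.join ['/'] (((split1 rest).1 :: (split1 rest).2).takeWhile cleanSeg)
                  = rpartition0 (rest.take i') := ih
              simp only [Option.map_some]
              rw [List.take_succ_cons, rpartition0]
              by_cases hcl : cleanSeg (split1 rest).1 = true
              · have hmem : '/' ∈ rest.take i' := (clean_fst_iff rest i' hI).mp hcl
                rw [if_pos hmem, ← ih']
                rw [List.takeWhile_cons_of_pos hcl, PySem.Chars.join_cons_cons]
                simp
              · have hclf : cleanSeg (split1 rest).1 = false := by simpa using hcl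
                have hnm : '/' ∉ rest.take i' := fun hm =>
                  hcl ((clean_fst_iff rest i' hI).mpr hm)
                rw [if_neg hnm]
                rw [List.takeWhile_cons_of_neg (by simp [hclf])]
                rw [PySem.Chars.join_singleton]
        · rw [split1_other _ _ hcs]
          have hcl : cleanSeg (c :: (split1 rest).1) = cleanSeg (split1 rest).1 := by
            simp [cleanSeg, hwc]
          cases hI : rest.findIdx? wildB with
          | none =>
              have hall : ∀ x ∈ rest, wildB x = false := List.findIdx?_eq_none_iff.mp hI
              have hcl1 : cleanSeg (split1 rest).1 = true := segs_clean rest hall _ (by simp)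
              have htw : ((split1 rest).1 :: (split1 rest).2).takeWhile cleanSeg
                  = (split1 rest).1 :: (split1 rest).2 :=
                List.takeWhile_eq_self_iff.mpr (segs_clean rest hall)
              rw [List.takeWhile_cons_of_pos (by rw [hcl]; exact hcl1)]
              have hjq : PySem.Chars.join ['/'] ((c :: (split1 rest).1) :: ((split1 rest).2.takeWhile cleanSeg))
                  = c :: PySem.Chars.join ['/'] ((split1 rest).1 :: ((split1 rest).2.takeWhile cleanSeg)) := by
                cases ht : (split1 rest).2.takeWhile cleanSeg with
                | nil => rw [PySem.Chars.join_singleton, PySem.Chars.join_singleton]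
                | cons q t => rw [PySem.Chars.join_cons_cons, PySem.Chars.join_cons_cons]; simp
              rw [hjq]
              have htw2 : (split1 rest).2.takeWhile cleanSeg = (split1 rest).2 := by
                have := htw
                rwa [List.takeWhile_cons_of_pos hcl1, List.cons_inj_right] at this
              rw [htw2]
              rw [join_split1 rest]
              simp
          | some i' =>
              rw [hI] at ih
              have ih' : PySem.Chars.join ['/'] (((split1 rest).1 :: (split1 rest).2).takeWhile cleanSeg)
                  = rpartition0 (rest.take i') := ih
              simp only [Option.map_some]
              rw [List.take_succ_cons, rpartition0]
              by_cases hcl1 : cleanSeg (split1 rest).1 = true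
              · have hmem : '/' ∈ rest.take i' := (clean_fst_iff rest i' hI).mp hcl1
                rw [if_pos hmem, ← ih']
                rw [List.takeWhile_cons_of_pos (by rw [hcl]; exact hcl1),
                    List.takeWhile_cons_of_pos hcl1]
                cases ht : (split1 rest).2.takeWhile cleanSeg with
                | nil => rw [PySem.Chars.join_singleton, PySem.Chars.join_singleton]
                | cons q t => rw [PySem.Chars.join_cons_cons, PySem.Chars.join_cons_cons]; simp
              · have hclf : cleanSeg (split1 rest).1 = false := by simpa using hcl1
                have hnm : '/' ∉ rest.take i' := fun hm =>
                  hcl1 ((clean_fst_iff rest i' hI).mpr hm)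
                rw [if_neg hnm]
                rw [List.takeWhile_cons_of_neg (by rw [hcl]; simp [hclf])]
                rw [PySem.Chars.join_nil]

-- ===== VERDICT (by name: the statement is the Claim_ definition above) =====
theorem pattern_base_py_spec : Claim_equal_pattern_base_py := by
  intro pattern _
  unfold Spec_pattern_base_py
  have hsep : "/".toList = ['/'] := rfl
  simp only [pattern_base_py, pattern_base_py_alt, hsep]
  rw [splitOn_eq_split1, pattern_base_go_eq, List.nil_append]
  rw [main_eq]
  cases hI : pattern.toList.findIdx? wildB with
  | none =>
      have hI' : pattern.toList.findIdx? (fun ch => "*?[{".toList.contains ch) = none := hI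
      rw [hI']
      simp only []
      by_cases hp : pattern = ""
      · subst hp; simp
      · have hne : pattern.toList ≠ [] := by
          simpa using hp
        rw [if_neg hne, if_neg hp]
        simp
  | some i =>
      have hI' : pattern.toList.findIdx? (fun ch => "*?[{".toList.contains ch) = some i := hI
      rw [hI']
      simp only [PySem.Chars.slice_eq_listSlice, PySem.List.slice_to_natCast]
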